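-- pv_equiv track=rewrite | github.com/Enerjyy/Chemistrycalc | app2.py | generate_formulas
-- ===== SOURCE A (Python) =====
-- from itertools import product
--
-- def generate_formulas(elements, max_atoms=3):
--     formulas = []
--     for combination in product(range(1, max_atoms + 1), repeat=len(elements)):
--         formula = ''
--         for count, element in zip(combination, elements):
--             if count == 1:
--                 formula += element
--             else:
--                 formula += f'{element}{count}'
--         formulas.append(formula)
--     return formulas
-- ===== SOURCE B (Python) =====
-- def generate_formulas(elements, max_atoms=3):
--     # Rank-decoding: formula number i is the base-`base` representation of i,
--     # digit d at a position meaning count d+1 for that element (last element = least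
--     # significant digit, so i counts in the same order as the count-tuples).
--     base = max(max_atoms, 0)
--     formulas = []
--     for i in range(base ** len(elements)):
--         pieces = []
--         for element in reversed(elements):
--             i, d = divmod(i, base)
--             count = d + 1
--             pieces.append(element if count == 1 else f'{element}{count}')
--         formulas.append(''.join(reversed(pieces)))
--     return formulas
-- ===== Notes on version B (the rewrite author's own statement) =====
-- stated objective: alternative
-- what changed: Replaced itertools.product's count-tuple enumeration plus a per-tuple assembly loop by rank decoding: each formula is computed directly from its index in range(base**n) by reading off the index's base-`base` digits (mixed radix, last element = least significant digit), so no tuple list is built.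
import Mathlib
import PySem

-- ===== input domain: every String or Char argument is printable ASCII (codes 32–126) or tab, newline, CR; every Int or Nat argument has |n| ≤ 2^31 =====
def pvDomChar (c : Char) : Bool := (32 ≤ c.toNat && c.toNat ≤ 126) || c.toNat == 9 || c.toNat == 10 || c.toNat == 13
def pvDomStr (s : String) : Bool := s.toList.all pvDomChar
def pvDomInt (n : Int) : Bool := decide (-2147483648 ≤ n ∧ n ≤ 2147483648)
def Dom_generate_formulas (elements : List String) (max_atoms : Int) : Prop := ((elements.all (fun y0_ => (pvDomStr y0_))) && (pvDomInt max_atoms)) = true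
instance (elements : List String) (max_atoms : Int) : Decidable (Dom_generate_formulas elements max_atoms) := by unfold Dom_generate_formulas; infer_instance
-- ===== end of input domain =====

-- B replaces the count-tuple enumeration (itertools.product) + per-tuple assembly loop by
-- rank decoding: formula i is read off the base-`base` digits of i (mixed-radix), so no
-- tuple list and no growing accumulator of partials is ever built; same cost, different algorithm.

-- ===== PORT A =====
-- itertools.product(range(1, max_atoms+1), repeat=n): all length-n tuples, last position varying fastest
def pvProductRep (xs : List Int) : Nat → List (List Int)
  | 0 => [[]]
  | n + 1 => xs.flatMap (fun x => (pvProductRep xs n).map (fun t => x :: t))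

def generate_formulas (elements : List String) (max_atoms : Int) : List String :=
  (pvProductRep (PySem.List.pyRange 1 (max_atoms + 1) 1) elements.length).foldl
    (fun formulas combination =>
      formulas ++ [ (combination.zip elements).foldl
        (fun formula ce =>
          if ce.1 == 1 then formula ++ ce.2
          else formula ++ (ce.2 ++ PySem.Int.toStr ce.1)) "" ])
    []

-- ===== PORT B =====
-- divmod(i, base) is ported as (floordiv, mod); exact, because the inner loop body only runs
-- when range(base ** len(elements)) is nonempty AND elements ≠ [], which forces base > 0.
def generate_formulas_alt (elements : List String) (max_atoms : Int) : List String :=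
  let base := max max_atoms 0
  (PySem.List.pyRange 0 (base ^ elements.length) 1).foldl
    (fun formulas i =>
      let st := elements.reverse.foldl
        (fun (st : Int × List String) element =>
          let q := PySem.Int.floordiv st.1 base
          let d := PySem.Int.mod st.1 base
          let count := d + 1
          (q, st.2 ++ [if count == 1 then element else element ++ PySem.Int.toStr count]))
        (i, [])
      formulas ++ [PySem.Str.join "" st.2.reverse])
    []

-- ===== PRECONDITION & SPEC =====
def Spec_generate_formulas (elements : List String) (max_atoms : Int) (out : List String) : Prop := out = generate_formulas_alt elements max_atoms
instance (elements : List String) (max_atoms : Int) (out : List String) : Decidable (Spec_generate_formulas elements max_atoms out) := by unfold Spec_generate_formulas; infer_instance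

-- ===== CLAIM (what is proved, stated in full; the proofs are below) =====
def Claim_equal_generate_formulas : Prop := ∀ (elements : List String) (max_atoms : Int), Dom_generate_formulas elements max_atoms → Spec_generate_formulas elements max_atoms (generate_formulas elements max_atoms)

-- ===== LEMMAS AND PROOFS =====

-- the string contributed by one (element, count) pair
def pvItem (e : String) (c : Int) : String :=
  if c == 1 then e else e ++ PySem.Int.toStr c

-- common recursive characterisation both ports are reduced to
def pvG (counts : List Int) : List String → List String
  | [] => [""]
  | e :: es => counts.flatMap (fun c =>
      (pvG counts es).map (fun s => pvItem e c ++ s))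

-- B's inner loop step and its fold
def pvStep (b : Int) (st : Int × List String) (element : String) : Int × List String :=
  (PySem.Int.floordiv st.1 b, st.2 ++ [pvItem element (PySem.Int.mod st.1 b + 1)])

def pvDec (b : Int) (es : List String) (i : Int) : Int × List String :=
  es.reverse.foldl (pvStep b) (i, [])

def pvF (b : Int) (es : List String) (i : Int) : String :=
  PySem.Str.join "" (pvDec b es i).2.reverse

theorem pvJoin_empty_cons (a : String) (l : List String) :
    PySem.Str.join "" (a :: l) = a ++ PySem.Str.join "" l := by
  cases l <;> simp [PySem.Str.join, PySem.Chars.join_cons_cons, PySem.Chars.join_singleton]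

theorem pvDec_cons (b : Int) (e : String) (es : List String) (i : Int) :
    pvDec b (e :: es) i = pvStep b (pvDec b es i) e := by
  simp [pvDec, List.foldl_append]

theorem pvDec_fst (b : Int) (hb : 0 < b) (es : List String) (i : Int) :
    (pvDec b es i).1 = PySem.Int.floordiv i (b ^ es.length) := by
  induction es with
  | nil =>
    simp [pvDec]
  | cons e es ih =>
    rw [pvDec_cons, pvStep, ih]
    have h1 : (0:Int) < b ^ es.length := by positivity
    have h2 : (0:Int) < b ^ (es.length + 1) := by positivity
    simp only [PySem.Int.floordiv_eq_ediv_of_pos hb, PySem.Int.floordiv_eq_ediv_of_pos h1,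
      List.length_cons, PySem.Int.floordiv_eq_ediv_of_pos h2]
    rw [Int.ediv_ediv_of_nonneg (le_of_lt h1), ← pow_succ]

theorem pvDec_shift (b : Int) (hb : 0 < b) (es : List String) (i t : Int) :
    pvDec b es (i + t * b ^ es.length) = ((pvDec b es i).1 + t, (pvDec b es i).2) := by
  induction es generalizing t with
  | nil => simp [pvDec]
  | cons e es ih =>
    have hx : i + t * b ^ (e :: es).length = i + (t * b) * b ^ es.length := by
      simp [List.length_cons, pow_succ]; ring
    rw [hx, pvDec_cons, ih (t * b), pvDec_cons]
    unfold pvStep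
    have hb' : b ≠ 0 := ne_of_gt hb
    simp only [PySem.Int.floordiv_eq_ediv_of_pos hb, PySem.Int.mod_eq_emod_of_pos hb]
    rw [Int.add_mul_ediv_right _ _ hb', Int.add_mul_emod_self_right]

-- the decoded string of index c*b^n + j  (0 ≤ j < b^n, 0 ≤ c < b) splits off its leading item
theorem pvF_split (b : Int) (hb : 0 < b) (e : String) (es : List String) (c j : Int)
    (hj0 : 0 ≤ j) (hj : j < b ^ es.length) (hc0 : 0 ≤ c) (hc : c < b) :
    pvF b (e :: es) (j + c * b ^ es.length) = pvItem e (c + 1) ++ pvF b es j := by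
  unfold pvF
  have hcons : (e :: es).length = es.length + 1 := rfl
  have hshift := pvDec_shift b hb es j c
  rw [pvDec_cons, hshift]
  have hz : (pvDec b es j).1 = 0 := by
    rw [pvDec_fst b hb,
      PySem.Int.floordiv_eq_ediv_of_pos (by positivity : (0:Int) < b ^ es.length)]
    exact Int.ediv_eq_zero_of_lt hj0 hj
  rw [hz, zero_add]
  unfold pvStep
  have hm : PySem.Int.mod c b = c := by
    rw [PySem.Int.mod_eq_emod_of_pos hb]; exact Int.emod_eq_of_lt hc0 hc
  simp [hm, pvJoin_empty_cons]

-- List.range (a * b) enumerated block-by-block (specific loop shape of B's rank decoding)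
theorem pvRangeMul (a b : Nat) :
    List.range (a * b) = (List.range a).flatMap (fun c => (List.range b).map (fun j => c * b + j)) := by
  induction a with
  | zero => simp
  | succ a ih => rw [Nat.succ_mul, List.range_add, List.range_succ, ih]; simp

-- B's decoded strings over the whole index range are exactly pvG
theorem pvB_eq_G (bn : Nat) (hb : 0 < bn) (es : List String) :
    (List.range (bn ^ es.length)).map (fun (k : Nat) => pvF (bn : Int) es (k : Int))
      = pvG ((List.range bn).map (fun (c : Nat) => (1 : Int) + (c : Int))) es := by
  induction es with
  | nil => simp [pvF, pvDec, pvG, PySem.Str.join]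
  | cons e es ih =>
    have hbi : (0:Int) < (bn : Int) := by exact_mod_cast hb
    rw [pvG, List.flatMap_map]
    have hlen : (e :: es).length = es.length + 1 := rfl
    rw [hlen, pow_succ, Nat.mul_comm, pvRangeMul, List.map_flatMap]
    refine List.flatMap_congr (fun c hc => ?_)
    have hcb : c < bn := List.mem_range.mp hc
    simp only [Function.comp_def, List.map_map]
    rw [← ih, List.map_map]
    refine List.map_congr_left (fun j hj => ?_)
    have hjb : j < bn ^ es.length := List.mem_range.mp hj
    simp only [Function.comp_apply]
    have hc2 : ((c * bn ^ es.length + j : Nat) : Int)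
        = (j : Int) + (c : Int) * (bn : Int) ^ es.length := by push_cast; ring
    rw [hc2, pvF_split (bn : Int) hbi e es _ _
      (by positivity) (by exact_mod_cast hjb) (by positivity) (by exact_mod_cast hcb),
      add_comm (c : Int) 1]

-- A's per-tuple assembly fold, with its accumulator pulled out front
theorem pvBuild_acc (ps : List (Int × String)) (init : String) :
    ps.foldl (fun formula ce =>
        if ce.1 == 1 then formula ++ ce.2
        else formula ++ (ce.2 ++ PySem.Int.toStr ce.1)) init
    = init ++ ps.foldl (fun formula ce =>
        if ce.1 == 1 then formula ++ ce.2
        else formula ++ (ce.2 ++ PySem.Int.toStr ce.1)) "" := by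
  induction ps generalizing init with
  | nil => simp
  | cons p ps ih =>
    simp only [List.foldl_cons]
    rw [ih, ih (if p.1 == 1 then "" ++ p.2 else "" ++ (p.2 ++ PySem.Int.toStr p.1))]
    split <;> simp [String.append_assoc]

theorem pvA_eq_G (counts : List Int) (elements : List String) :
    (pvProductRep counts elements.length).map
      (fun combination => (combination.zip elements).foldl
        (fun formula ce =>
          if ce.1 == 1 then formula ++ ce.2
          else formula ++ (ce.2 ++ PySem.Int.toStr ce.1)) "")
    = pvG counts elements := by
  induction elements with
  | nil => simp [pvProductRep, pvG]
  | cons e es ih =>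
    simp only [List.length_cons, pvProductRep, pvG, List.map_flatMap, List.map_map]
    refine List.flatMap_congr (fun c _ => ?_)
    rw [← ih, List.map_map]
    refine List.map_congr_left (fun t _ => ?_)
    simp only [Function.comp, List.zip_cons_cons, List.foldl_cons]
    rw [pvBuild_acc]
    unfold pvItem
    split <;> simp

theorem generate_formulas_spec : Claim_equal_generate_formulas := by
  intro elements m _
  unfold Spec_generate_formulas generate_formulas generate_formulas_alt
  rw [PySem.List.foldl_append_singleton_eq_map, PySem.List.foldl_append_singleton_eq_map,
    List.nil_append, List.nil_append, pvA_eq_G]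
  have hb0 : (0:Int) ≤ max m 0 := le_max_right m 0
  obtain ⟨bn, hcast⟩ : ∃ bn : Nat, max m 0 = (bn : Int) :=
    ⟨(max m 0).toNat, (Int.toNat_of_nonneg hb0).symm⟩
  have hcounts : PySem.List.pyRange 1 (m + 1) 1
      = (List.range bn).map (fun (c : Nat) => (1 : Int) + (c : Int)) := by
    rw [PySem.List.pyRange_one, show (m + 1 - 1).toNat = bn by omega]
  have hrange : PySem.List.pyRange 0 (max m 0 ^ elements.length) 1
      = (List.range (bn ^ elements.length)).map (fun (k : Nat) => (k : Int)) := by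
    rw [PySem.List.pyRange_one, hcast, sub_zero, ← Nat.cast_pow, Int.toNat_natCast]
    simp
  rw [hcounts, hrange, List.map_map]
  rcases Nat.eq_zero_or_pos bn with h0 | hpos
  · -- max_atoms ≤ 0: the answer is [''] for no elements and [] otherwise, on both sides
    subst h0
    cases elements with
    | nil => rfl
    | cons e es => simp [pvG]
  · rw [← pvB_eq_G bn hpos elements]
    refine List.map_congr_left (fun k _ => ?_)
    simp only [Function.comp_apply]
    rw [hcast]
    rfl
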